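-- pv_equiv track=rewrite | github.com/seb0xff/jxa-builder | old/recase.py | recase
-- ===== SOURCE A (Python) =====
-- from typing import Literal
--
-- def recase(
--     text: str, target_case: Literal['camel', 'constant', 'sentence', 'snake',
--                                     'dot', 'kebab', 'path', 'pascal', 'header',
--                                     'title']
-- ) -> str:
--   symbol_set = {' ', '.', '/', '_', '\\', '-'}
--   words = []
--   sb = ''
--   is_all_caps = text.upper() == text
--
--   for i in range(len(text)):
--     char = text[i]
--     next_char = text[i + 1] if i + 1 < len(text) else None
--
--     if char in symbol_set:
--       continue
--
--     sb += char
--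
--     is_end_of_word = next_char is None or (
--         next_char.isupper() and not is_all_caps) or next_char in symbol_set
--
--     if is_end_of_word:
--       words.append(sb)
--       sb = ''
--
--   if target_case == 'camel':
--     words = [
--         word.capitalize() if i > 0 else word.lower()
--         for i, word in enumerate(words)
--     ]
--     return ''.join(words)
--   elif target_case == 'constant':
--     return '_'.join([word.upper() for word in words])
--   elif target_case == 'sentence':
--     words = [word.lower() for word in words]
--     words[0] = words[0].capitalize()
--     return ' '.join(words)
--   elif target_case == 'snake':
--     return '_'.join([word.lower() for word in words])
--   elif target_case == 'dot':
--     return '.'.join([word.lower() for word in words])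
--   elif target_case == 'kebab':
--     return '-'.join([word.lower() for word in words])
--   elif target_case == 'path':
--     return '/'.join([word.lower() for word in words])
--   elif target_case == 'pascal':
--     words = [word.capitalize() for word in words]
--     return ''.join(words)
--   elif target_case == 'header':
--     words = [word.capitalize() for word in words]
--     return '-'.join(words)
--   elif target_case == 'title':
--     words = [word.capitalize() for word in words]
--     return ' '.join(words)
--   else:
--     raise ValueError(f'Invalid target case: {target_case}')
-- ===== SOURCE B (Python) =====
-- _SYMS = {' ', '.', '/', '_', '\\', '-'}
--
-- _TABLE = {
--     'camel': ('', str.lower, str.capitalize),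
--     'constant': ('_', str.upper, str.upper),
--     'sentence': (' ', str.capitalize, str.lower),
--     'snake': ('_', str.lower, str.lower),
--     'dot': ('.', str.lower, str.lower),
--     'kebab': ('-', str.lower, str.lower),
--     'path': ('/', str.lower, str.lower),
--     'pascal': ('', str.capitalize, str.capitalize),
--     'header': ('-', str.capitalize, str.capitalize),
--     'title': (' ', str.capitalize, str.capitalize),
-- }
--
--
-- def _chunks(text):
--   """Split text on the symbol set, dropping empty pieces."""
--   chunks = []
--   cur = ''
--   for ch in text:
--     if ch in _SYMS:
--       if cur:
--         chunks.append(cur)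
--       cur = ''
--     else:
--       cur += ch
--   if cur:
--     chunks.append(cur)
--   return chunks
--
--
-- def _camel_split(chunk, is_all_caps):
--   """Split a non-empty symbol-free chunk at camelCase boundaries."""
--   parts = []
--   cur = chunk[0]
--   for ch in chunk[1:]:
--     if ch.isupper() and not is_all_caps:
--       parts.append(cur)
--       cur = ch
--     else:
--       cur += ch
--   parts.append(cur)
--   return parts
--
--
-- def recase(text, target_case):
--   is_all_caps = text.upper() == text
--   words = [w for chunk in _chunks(text) for w in _camel_split(chunk, is_all_caps)]
--   sep, f0, frest = _TABLE[target_case]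
--   return sep.join(
--       (f0 if i == 0 else frest)(w) for i, w in enumerate(words))
-- ===== Notes on version B (the rewrite author's own statement) =====
-- stated objective: alternative
-- what changed: A's single index loop with lookahead that builds the word list while scanning plus a 10-branch if/elif chain is replaced by a two-pass decomposition (split on the symbol set dropping empties, then split each chunk at camelCase boundaries) feeding a single table-driven join (separator + first/rest transform per case).
import Mathlib
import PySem

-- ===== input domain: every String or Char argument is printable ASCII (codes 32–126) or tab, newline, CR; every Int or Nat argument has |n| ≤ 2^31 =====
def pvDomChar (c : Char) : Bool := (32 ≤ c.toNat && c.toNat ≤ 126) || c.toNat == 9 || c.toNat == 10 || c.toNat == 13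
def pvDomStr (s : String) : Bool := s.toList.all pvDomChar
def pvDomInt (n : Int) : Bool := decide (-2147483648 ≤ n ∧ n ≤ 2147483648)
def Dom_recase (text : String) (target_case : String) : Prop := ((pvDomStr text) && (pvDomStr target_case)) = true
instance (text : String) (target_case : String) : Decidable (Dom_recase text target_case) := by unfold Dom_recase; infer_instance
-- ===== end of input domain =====

-- B re-decomposes A's one combined scan into symbol-split + per-chunk camel-split and a
-- table-driven join; same return value everywhere A returns (alternative decomposition, no speed claim).

-- ===== PORT A =====

-- char ∈ symbol_set
def pvSym (c : Char) : Bool := c == ' ' || c == '.' || c == '/' || c == '_' || c == '\\' || c == '-'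

-- is_end_of_word, looking at the remaining characters (next_char = head, None = [])
def pvEndOfWord (U : Bool) : List Char → Bool
  | [] => true
  | d :: _ => (PySem.Chars.isupper d && !U) || pvSym d

-- A's `for i in range(len(text))` loop over (remaining chars, sb)
def pvWordsA (U : Bool) : List Char → List Char → List (List Char)
  | [], _ => []
  | c :: rest, sb =>
    if pvSym c then pvWordsA U rest sb
    else if pvEndOfWord U rest then (sb ++ [c]) :: pvWordsA U rest []
    else pvWordsA U rest (sb ++ [c])

-- Python str.capitalize(): first char uppercased, rest lowered (exact on ASCII, the stated domain)
def pvCap (w : List Char) : List Char :=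
  match w with
  | [] => []
  | c :: r => PySem.Chars.upperChar c :: PySem.Chars.lower r

def recase (text : String) (target_case : String) : String :=
  let U : Bool := PySem.Str.upper text == text
  let ws : List (List Char) := pvWordsA U text.toList []
  String.ofList
    (if target_case == "camel" then
      PySem.Chars.join [] ((PySem.List.enumerate ws).map
        (fun p => if p.1 > 0 then pvCap p.2 else PySem.Chars.lower p.2))
    else if target_case == "constant" then PySem.Chars.join ['_'] (ws.map PySem.Chars.upper)
    else if target_case == "sentence" then
      match ws.map PySem.Chars.lower with
      | [] => []  -- Python raises IndexError (words[0]); excluded by Pre_recase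
      | w0 :: rest => PySem.Chars.join [' '] (pvCap w0 :: rest)
    else if target_case == "snake" then PySem.Chars.join ['_'] (ws.map PySem.Chars.lower)
    else if target_case == "dot" then PySem.Chars.join ['.'] (ws.map PySem.Chars.lower)
    else if target_case == "kebab" then PySem.Chars.join ['-'] (ws.map PySem.Chars.lower)
    else if target_case == "path" then PySem.Chars.join ['/'] (ws.map PySem.Chars.lower)
    else if target_case == "pascal" then PySem.Chars.join [] (ws.map pvCap)
    else if target_case == "header" then PySem.Chars.join ['-'] (ws.map pvCap)
    else if target_case == "title" then PySem.Chars.join [' '] (ws.map pvCap)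
    else [])  -- Python raises ValueError; excluded by Pre_recase

-- ===== PORT B =====

-- _chunks: split on the symbol set, dropping empty pieces (loop state = cur)
def pvChunks : List Char → List Char → List (List Char)
  | [], cur => if cur.isEmpty then [] else [cur]
  | c :: rest, cur =>
    if pvSym c then (if cur.isEmpty then pvChunks rest [] else cur :: pvChunks rest [])
    else pvChunks rest (cur ++ [c])

-- _camel_split's loop (state = cur, already holding chunk[0])
def pvCamelSplit (U : Bool) : List Char → List Char → List (List Char)
  | cur, [] => [cur]
  | cur, c :: rest =>
    if PySem.Chars.isupper c && !U then cur :: pvCamelSplit U [c] rest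
    else pvCamelSplit U (cur ++ [c]) rest

-- _camel_split(chunk, ...): chunks are never empty; [] case is unreachable
def pvCamelOf (U : Bool) (chunk : List Char) : List (List Char) :=
  match chunk with
  | [] => []
  | c :: r => pvCamelSplit U [c] r

-- the three method names appearing in _TABLE: 0 = lower, 1 = upper, 2 = capitalize
def pvApply (code : Nat) (w : List Char) : List Char :=
  if code == 0 then PySem.Chars.lower w
  else if code == 1 then PySem.Chars.upper w
  else pvCap w

def pvTable : List (String × List Char × Nat × Nat) :=
  [("camel", ([], 0, 2)), ("constant", (['_'], 1, 1)), ("sentence", ([' '], 2, 0)),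
   ("snake", (['_'], 0, 0)), ("dot", (['.'], 0, 0)), ("kebab", (['-'], 0, 0)),
   ("path", (['/'], 0, 0)), ("pascal", ([], 2, 2)), ("header", (['-'], 2, 2)),
   ("title", ([' '], 2, 2))]

def recase_alt (text : String) (target_case : String) : String :=
  let U : Bool := PySem.Str.upper text == text
  let words : List (List Char) := (pvChunks text.toList []).flatMap (pvCamelOf U)
  match pvTable.lookup target_case with
  | none => ""  -- Python raises KeyError; excluded by Pre_recase
  | some (sep, f0, fr) =>
    String.ofList (PySem.Chars.join sep ((PySem.List.enumerate words).map
      (fun p => pvApply (if p.1 == 0 then f0 else fr) p.2)))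

-- ===== PRECONDITION & SPEC =====

-- Pre_ excludes exactly the inputs where A raises: an invalid target_case (ValueError) and
-- 'sentence' on text with no non-symbol character (IndexError on words[0]).
def Pre_recase (text : String) (target_case : String) : Prop :=
  (target_case = "camel" ∨ target_case = "constant" ∨ target_case = "sentence" ∨
   target_case = "snake" ∨ target_case = "dot" ∨ target_case = "kebab" ∨
   target_case = "path" ∨ target_case = "pascal" ∨ target_case = "header" ∨
   target_case = "title") ∧
  (target_case = "sentence" → text.toList.any (fun c => !pvSym c) = true)
instance (text : String) (target_case : String) : Decidable (Pre_recase text target_case) := by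
  unfold Pre_recase; infer_instance

def pvWitness_recase : String × String := ("foo_barBaz", "snake")

def Spec_recase (text : String) (target_case : String) (out : String) : Prop := out = recase_alt text target_case
instance (text : String) (target_case : String) (out : String) : Decidable (Spec_recase text target_case out) := by unfold Spec_recase; infer_instance

-- ===== CLAIM (what is proved, stated in full; the proofs are below) =====
def Claim_equal_recase : Prop := ∀ (text : String) (target_case : String), Dom_recase text target_case → Pre_recase text target_case → Spec_recase text target_case (recase text target_case)

-- ===== LEMMAS AND PROOFS =====

-- B's word list, as a function (proof-side abbreviation for recase_alt's `words`)
def pvWordsB (U : Bool) (cs : List Char) : List (List Char) :=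
  (pvChunks cs []).flatMap (pvCamelOf U)

-- A's scan resumed mid-word with partial word sb (proof-side)
def pvMid (U : Bool) : List Char → List Char → List (List Char)
  | sb, [] => [sb]
  | sb, c :: rest =>
    if pvSym c then sb :: pvWordsB U rest
    else if PySem.Chars.isupper c && !U then sb :: pvMid U [c] rest
    else pvMid U (sb ++ [c]) rest

-- boundary-free: no char starts a new camel word
def pvBF (U : Bool) (cs : List Char) : Prop := ∀ d ∈ cs, (PySem.Chars.isupper d && !U) = false

theorem chle (a b : Char) : (a ≤ b) ↔ a.toNat ≤ b.toNat := by
  rw [Char.le_def, UInt32.le_iff_toNat_le]; rfl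

theorem toNat_ofNat' (n : Nat) (h1 : n < 55296) : (Char.ofNat n).toNat = n := by
  rw [Char.toNat_ofNat, if_pos (Or.inl h1)]

theorem upperChar_lowerChar (c : Char) :
    PySem.Chars.upperChar (PySem.Chars.lowerChar c) = PySem.Chars.upperChar c := by
  have e1 : 'A'.toNat = 65 := rfl
  have e2 : 'Z'.toNat = 90 := rfl
  have e3 : 'a'.toNat = 97 := rfl
  have e4 : 'z'.toNat = 122 := rfl
  simp only [PySem.Chars.upperChar, PySem.Chars.lowerChar, PySem.Chars.isupper,
    PySem.Chars.islower, Bool.and_eq_true, decide_eq_true_eq]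
  by_cases h : 'A' ≤ c ∧ c ≤ 'Z'
  · have h1 : 65 ≤ c.toNat := by have := (chle 'A' c).mp h.1; omega
    have h2 : c.toNat ≤ 90 := by have := (chle c 'Z').mp h.2; omega
    have hv : (Char.ofNat (c.toNat + 32)).toNat = c.toNat + 32 := toNat_ofNat' _ (by omega)
    have ha : 'a' ≤ Char.ofNat (c.toNat + 32) := (chle _ _).mpr (by omega)
    have hz : Char.ofNat (c.toNat + 32) ≤ 'z' := (chle _ _).mpr (by omega)
    have hnotlow : ¬('a' ≤ c ∧ c ≤ 'z') := by
      intro hc; have := (chle 'a' c).mp hc.1; omega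
    rw [if_pos h, if_pos ⟨ha, hz⟩, if_neg hnotlow, hv]
    have : c.toNat + 32 - 32 = c.toNat := by omega
    rw [this, Char.ofNat_toNat]
  · simp only [if_neg h]

theorem lowerChar_idem (c : Char) :
    PySem.Chars.lowerChar (PySem.Chars.lowerChar c) = PySem.Chars.lowerChar c := by
  have e1 : 'A'.toNat = 65 := rfl
  have e2 : 'Z'.toNat = 90 := rfl
  simp only [PySem.Chars.lowerChar, PySem.Chars.isupper, Bool.and_eq_true, decide_eq_true_eq]
  by_cases h : 'A' ≤ c ∧ c ≤ 'Z'
  · have h1 : 65 ≤ c.toNat := by have := (chle 'A' c).mp h.1; omega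
    have h2 : c.toNat ≤ 90 := by have := (chle c 'Z').mp h.2; omega
    have hv : (Char.ofNat (c.toNat + 32)).toNat = c.toNat + 32 := toNat_ofNat' _ (by omega)
    rw [if_pos h, if_neg (by
      intro hc
      have hA := (chle 'A' _).mp hc.1
      have hZ := (chle _ 'Z').mp hc.2
      omega)]
  · simp only [if_neg h]

theorem lower_lower (w : List Char) :
    PySem.Chars.lower (PySem.Chars.lower w) = PySem.Chars.lower w := by
  simp only [PySem.Chars.lower, List.map_map]
  exact List.map_congr_left (fun c _ => lowerChar_idem c)

theorem cap_lower (w : List Char) : pvCap (PySem.Chars.lower w) = pvCap w := by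
  cases w with
  | nil => rfl
  | cons c r =>
    show pvCap (PySem.Chars.lowerChar c :: PySem.Chars.lower r) = _
    simp only [pvCap, upperChar_lowerChar, lower_lower]

theorem enumFG_pos (F G : List Char → List Char) : ∀ (ws : List (List Char)) (s : Int), 1 ≤ s →
    (PySem.List.enumerate ws s).map (fun p => if p.1 == 0 then F p.2 else G p.2) = ws.map G := by
  intro ws
  induction ws with
  | nil => intro s _; simp [PySem.List.enumerate_nil]
  | cons w wt ih =>
    intro s hs
    rw [PySem.List.enumerate_cons]
    simp only [List.map_cons]
    have h0 : (s == 0) = false := by simp; omega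
    rw [h0]
    simp only [Bool.false_eq_true, if_false]
    rw [ih (s + 1) (by omega)]

theorem enumFG_zero (F G : List Char → List Char) (ws : List (List Char)) :
    (PySem.List.enumerate ws 0).map (fun p => if p.1 == 0 then F p.2 else G p.2) =
      (match ws with | [] => [] | w0 :: wt => F w0 :: wt.map G) := by
  cases ws with
  | nil => simp [PySem.List.enumerate_nil]
  | cons w wt =>
    rw [PySem.List.enumerate_cons]
    simp only [List.map_cons]
    rw [if_pos (by simp)]
    norm_num
    have := enumFG_pos F G wt 1 le_rfl
    simpa using this

theorem enumGT_pos (F G : List Char → List Char) : ∀ (ws : List (List Char)) (s : Int), 1 ≤ s →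
    (PySem.List.enumerate ws s).map (fun p => if p.1 > 0 then G p.2 else F p.2) = ws.map G := by
  intro ws
  induction ws with
  | nil => intro s _; simp [PySem.List.enumerate_nil]
  | cons w wt ih =>
    intro s hs
    rw [PySem.List.enumerate_cons]
    simp only [List.map_cons]
    rw [if_pos (by omega : (0:Int) < s)]
    rw [ih (s + 1) (by omega)]

theorem enumGT_zero (F G : List Char → List Char) (ws : List (List Char)) :
    (PySem.List.enumerate ws 0).map (fun p => if p.1 > 0 then G p.2 else F p.2) =
      (match ws with | [] => [] | w0 :: wt => F w0 :: wt.map G) := by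
  cases ws with
  | nil => simp [PySem.List.enumerate_nil]
  | cons w wt =>
    rw [PySem.List.enumerate_cons]
    simp only [List.map_cons]
    rw [if_neg (by simp)]
    norm_num [enumGT_pos F G wt 1 le_rfl]

theorem camel_prefix (U : Bool) : ∀ (y a x : List Char), pvBF U y →
    pvCamelSplit U a (y ++ x) = pvCamelSplit U (a ++ y) x := by
  intro y
  induction y with
  | nil => intro a x _; simp
  | cons d y' ih =>
    intro a x hbf
    have hd : (PySem.Chars.isupper d && !U) = false := hbf d (by simp)
    have hy' : pvBF U y' := fun e he => hbf e (by simp [he])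
    simp only [List.cons_append, pvCamelSplit, hd]
    rw [ih (a ++ [d]) x hy']
    simp

theorem camelSplit_ne (U : Bool) : ∀ (rest a : List Char), pvCamelSplit U a rest ≠ [] := by
  intro rest
  induction rest with
  | nil => intro a; simp [pvCamelSplit]
  | cons c r ih =>
    intro a
    simp only [pvCamelSplit]
    split
    · simp
    · exact ih _

theorem chunks_flat_factor (U : Bool) : ∀ (r : List Char) (ws : List (List Char)) (cur₁ cur₂ : List Char),
    cur₁ ≠ [] → cur₂ ≠ [] →
    (∀ p, pvCamelOf U (cur₁ ++ p) = ws ++ pvCamelOf U (cur₂ ++ p)) →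
    (pvChunks r cur₁).flatMap (pvCamelOf U) = ws ++ (pvChunks r cur₂).flatMap (pvCamelOf U) := by
  intro r
  induction r with
  | nil =>
    intro ws cur₁ cur₂ h1 h2 hp
    have e1 : cur₁.isEmpty = false := by simpa using h1
    have e2 : cur₂.isEmpty = false := by simpa using h2
    simp only [pvChunks, e1, e2, Bool.false_eq_true, if_false, List.flatMap_cons,
      List.flatMap_nil, List.append_nil]
    simpa using hp []
  | cons c rest ih =>
    intro ws cur₁ cur₂ h1 h2 hp
    have e1 : cur₁.isEmpty = false := by simpa using h1
    have e2 : cur₂.isEmpty = false := by simpa using h2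
    by_cases hc : pvSym c = true
    · simp only [pvChunks, hc, if_true, e1, e2, Bool.false_eq_true, if_false, List.flatMap_cons]
      rw [← List.append_assoc]
      congr 1
      simpa using hp []
    · have hc' : pvSym c = false := by simpa using hc
      simp only [pvChunks, hc', Bool.false_eq_true, if_false]
      exact ih ws (cur₁ ++ [c]) (cur₂ ++ [c]) (by simp) (by simp)
        (fun p => by simpa [List.append_assoc] using hp ([c] ++ p))

theorem camelOf_single (U : Bool) (c0 : Char) (st : List Char) (hbf : pvBF U st) :
    pvCamelOf U (c0 :: st) = [c0 :: st] := by
  show pvCamelSplit U [c0] st = [c0 :: st]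
  calc pvCamelSplit U [c0] st = pvCamelSplit U [c0] (st ++ []) := by simp
    _ = pvCamelSplit U ([c0] ++ st) [] := camel_prefix U st [c0] [] hbf
    _ = [c0 :: st] := by simp [pvCamelSplit]

theorem mid_eq_B (U : Bool) : ∀ (rest : List Char) (c0 : Char) (st : List Char), pvBF U st →
    pvMid U (c0 :: st) rest = (pvChunks rest (c0 :: st)).flatMap (pvCamelOf U) := by
  intro rest
  induction rest with
  | nil =>
    intro c0 st hbf
    simp [pvMid, pvChunks, camelOf_single U c0 st hbf]
  | cons c r ih =>
    intro c0 st hbf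
    by_cases hc : pvSym c = true
    · simp only [pvMid, hc, if_true, pvChunks, List.isEmpty_cons, Bool.false_eq_true, if_false,
        List.flatMap_cons, camelOf_single U c0 st hbf]
      rfl
    · have hc' : pvSym c = false := by simpa using hc
      by_cases hb : (PySem.Chars.isupper c && !U) = true
      · simp only [pvMid, hc', Bool.false_eq_true, if_false, hb, if_true]
        rw [ih c [] (by intro d hd; simp at hd)]
        simp only [pvChunks, hc', Bool.false_eq_true, if_false]
        rw [chunks_flat_factor U r [c0 :: st] ((c0 :: st) ++ [c]) [c] (by simp) (by simp)
          (fun p => ?_)]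
        · rfl
        · show pvCamelOf U (c0 :: st ++ [c] ++ p) = [c0 :: st] ++ pvCamelOf U ([c] ++ p)
          simp only [List.cons_append, List.append_assoc, pvCamelOf, List.nil_append]
          rw [show (st ++ c :: p) = st ++ ([c] ++ p) by simp,
            camel_prefix U st [c0] ([c] ++ p) hbf]
          simp [pvCamelSplit, hb]
      · have hb' : (PySem.Chars.isupper c && !U) = false := by simpa using hb
        simp only [pvMid, hc', Bool.false_eq_true, if_false, hb']
        have hbf' : pvBF U (st ++ [c]) := by
          intro d hd
          rcases List.mem_append.mp hd with h | h
          · exact hbf d h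
          · simp at h; subst h; exact hb'
        have := ih c0 (st ++ [c]) hbf'
        simp only [pvChunks, hc', Bool.false_eq_true, if_false]
        simpa using this

theorem wordsA_eq_mid (U : Bool) : ∀ (n : Nat) (cs : List Char), cs.length ≤ n →
    (pvWordsA U cs [] = pvWordsB U cs) ∧
    (∀ sb, sb ≠ [] → pvEndOfWord U cs = false → pvWordsA U cs sb = pvMid U sb cs) ∧
    (∀ d r, cs = d :: r → pvSym d = false → pvWordsA U cs [] = pvMid U [d] r) := by
  intro n
  induction n with
  | zero =>
    intro cs hlen
    have : cs = [] := List.eq_nil_of_length_eq_zero (Nat.le_zero.mp hlen)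
    subst this
    refine ⟨by simp [pvWordsA, pvWordsB, pvChunks], ?_, ?_⟩
    · intro sb hsb hend; simp [pvEndOfWord] at hend
    · intro d r h; simp at h
  | succ m ih =>
    intro cs hlen
    -- (3) first
    have h3 : ∀ d r, cs = d :: r → pvSym d = false → pvWordsA U cs [] = pvMid U [d] r := by
      intro d r hcs hd
      subst hcs
      have hr : r.length ≤ m := by simpa using hlen
      simp only [pvWordsA, hd, Bool.false_eq_true, if_false, List.nil_append]
      cases r with
      | nil => simp [pvEndOfWord, pvWordsA, pvMid]
      | cons e r' =>
        by_cases he : pvSym e = true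
        · have hend : pvEndOfWord U (e :: r') = true := by simp [pvEndOfWord, he]
          rw [if_pos hend]
          simp only [pvMid, he, if_true]
          congr 1
          have h1 := (ih r' (by simp at hr; omega)).1
          calc pvWordsA U (e :: r') [] = pvWordsA U r' [] := by
                simp [pvWordsA, he]
            _ = pvWordsB U r' := h1
        · have he' : pvSym e = false := by simpa using he
          by_cases hb : (PySem.Chars.isupper e && !U) = true
          · have hend : pvEndOfWord U (e :: r') = true := by simp [pvEndOfWord, hb]
            rw [if_pos hend]
            simp only [pvMid, he', Bool.false_eq_true, if_false, hb, if_true]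
            congr 1
            exact (ih (e :: r') hr).2.2 e r' rfl he'
          · have hend : pvEndOfWord U (e :: r') = false := by
              simp [pvEndOfWord, he', (by simpa using hb : (PySem.Chars.isupper e && !U) = false)]
            rw [if_neg (by simp [hend])]
            exact (ih (e :: r') hr).2.1 [d] (by simp) hend
    refine ⟨?_, ?_, h3⟩
    · -- (1)
      cases cs with
      | nil => simp [pvWordsA, pvWordsB, pvChunks]
      | cons c rest =>
        have hr : rest.length ≤ m := by simpa using hlen
        by_cases hc : pvSym c = true
        · have h1 := (ih rest hr).1
          calc pvWordsA U (c :: rest) [] = pvWordsA U rest [] := by simp [pvWordsA, hc]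
            _ = pvWordsB U rest := h1
            _ = pvWordsB U (c :: rest) := by simp [pvWordsB, pvChunks, hc]
        · have hc' : pvSym c = false := by simpa using hc
          rw [h3 c rest rfl hc']
          rw [mid_eq_B U rest c [] (by intro d hd; simp at hd)]
          simp [pvWordsB, pvChunks, hc']
    · -- (2)
      intro sb hsb hend
      cases cs with
      | nil => simp [pvEndOfWord] at hend
      | cons c rest =>
        have hr : rest.length ≤ m := by simpa using hlen
        have hc' : pvSym c = false := by
          by_contra h
          simp [pvEndOfWord, (by simpa using h : pvSym c = true)] at hend
        have hb' : (PySem.Chars.isupper c && !U) = false := by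
          by_contra h
          simp [pvEndOfWord, (by simpa using h : (PySem.Chars.isupper c && !U) = true)] at hend
        simp only [pvWordsA, hc', Bool.false_eq_true, if_false, pvMid, hb']
        cases rest with
        | nil => simp [pvEndOfWord, pvWordsA, pvMid]
        | cons e r' =>
          by_cases he : pvSym e = true
          · have hendr : pvEndOfWord U (e :: r') = true := by simp [pvEndOfWord, he]
            rw [if_pos hendr]
            simp only [pvMid, he, if_true]
            congr 1
            have h1 := (ih r' (by simp at hr; omega)).1
            calc pvWordsA U (e :: r') [] = pvWordsA U r' [] := by simp [pvWordsA, he]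
              _ = pvWordsB U r' := h1
          · have he' : pvSym e = false := by simpa using he
            by_cases hb : (PySem.Chars.isupper e && !U) = true
            · have hendr : pvEndOfWord U (e :: r') = true := by simp [pvEndOfWord, hb]
              rw [if_pos hendr]
              simp only [pvMid, he', Bool.false_eq_true, if_false, hb, if_true]
              congr 1
              exact (ih (e :: r') hr).2.2 e r' rfl he'
            · have hendr : pvEndOfWord U (e :: r') = false := by
                simp [pvEndOfWord, he', (by simpa using hb : (PySem.Chars.isupper e && !U) = false)]
              rw [if_neg (by simp [hendr])]
              exact (ih (e :: r') hr).2.1 (sb ++ [c]) (by simp) hendr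

theorem wordsA_eq_wordsB (U : Bool) (cs : List Char) : pvWordsA U cs [] = pvWordsB U cs :=
  (wordsA_eq_mid U cs.length cs le_rfl).1

theorem camelOf_ne (U : Bool) (c : Char) (r : List Char) : pvCamelOf U (c :: r) ≠ [] :=
  camelSplit_ne U r [c]

theorem wordsB_ne (U : Bool) : ∀ (cs cur : List Char),
    (cur ≠ [] ∨ ∃ c ∈ cs, pvSym c = false) →
    (pvChunks cs cur).flatMap (pvCamelOf U) ≠ [] := by
  intro cs
  induction cs with
  | nil =>
    intro cur h
    rcases h with h | h
    · have e : cur.isEmpty = false := by simpa using h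
      simp only [pvChunks, e, Bool.false_eq_true, if_false, List.flatMap_cons, List.flatMap_nil,
        List.append_nil]
      cases cur with
      | nil => exact absurd rfl h
      | cons c r => exact camelOf_ne U c r
    · simp at h
  | cons c rest ih =>
    intro cur h
    by_cases hc : pvSym c = true
    · cases cur with
      | nil =>
        simp only [pvChunks, hc, if_true, List.isEmpty_nil, if_true]
        apply ih
        rcases h with h | ⟨e, he, hse⟩
        · exact absurd rfl h
        · rcases List.mem_cons.mp he with rfl | hm
          · rw [hc] at hse; exact absurd hse (by simp)
          · exact Or.inr ⟨e, hm, hse⟩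
      | cons a b =>
        simp only [pvChunks, hc, if_true, List.isEmpty_cons, Bool.false_eq_true, if_false,
          List.flatMap_cons]
        intro hcontra
        exact camelOf_ne U a b (List.append_eq_nil_iff.mp hcontra).1
    · have hc' : pvSym c = false := by simpa using hc
      simp only [pvChunks, hc', Bool.false_eq_true, if_false]
      exact ih (cur ++ [c]) (Or.inl (by simp))


theorem wordsA_eq_flat (U : Bool) (cs : List Char) :
    pvWordsA U cs [] = (pvChunks cs []).flatMap (pvCamelOf U) :=
  wordsA_eq_wordsB U cs

theorem enumApp_zero (k m : Nat) (ws : List (List Char)) :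
    (PySem.List.enumerate ws 0).map (fun p => pvApply (if p.1 == 0 then k else m) p.2) =
      (match ws with | [] => [] | w0 :: wt => pvApply k w0 :: wt.map (pvApply m)) := by
  rw [show (fun (p : Int × List Char) => pvApply (if p.1 == 0 then k else m) p.2) =
      (fun p => if p.1 == 0 then pvApply k p.2 else pvApply m p.2) from
    funext (fun p => apply_ite (fun j => pvApply j p.2) _ _ _)]
  exact enumFG_zero (pvApply k) (pvApply m) ws

theorem pvApply_zero : pvApply 0 = PySem.Chars.lower := funext (fun w => by simp [pvApply])
theorem pvApply_one : pvApply 1 = PySem.Chars.upper := funext (fun w => by simp [pvApply])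
theorem pvApply_two : pvApply 2 = pvCap := funext (fun w => by simp [pvApply])

theorem enum_map_snd (f : List Char → List Char) (W : List (List Char)) (s : Int) :
    (PySem.List.enumerate W s).map (fun p => f p.2) = W.map f := by
  rw [show (fun (p : Int × List Char) => f p.2) = f ∘ Prod.snd from rfl, ← List.map_map,
    PySem.List.map_snd_enumerate]

-- ===== VERDICT =====
theorem recase_spec : Claim_equal_recase := by
  intro text target_case hDom hPre
  obtain ⟨hmem, hsent⟩ := hPre
  show recase text target_case = recase_alt text target_case
  rcases hmem with rfl | rfl | rfl | rfl | rfl | rfl | rfl | rfl | rfl | rfl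
  · -- camel
    simp only [recase, recase_alt]
    rw [show pvTable.lookup "camel" = some (([]:List Char), 0, 2) from rfl]
    simp only [beq_self_eq_true, show (("camel" == "constant"):Bool) = false from rfl, show (("camel" == "sentence"):Bool) = false from rfl, show (("camel" == "snake"):Bool) = false from rfl, show (("camel" == "dot"):Bool) = false from rfl, show (("camel" == "kebab"):Bool) = false from rfl, show (("camel" == "path"):Bool) = false from rfl, show (("camel" == "pascal"):Bool) = false from rfl, show (("camel" == "header"):Bool) = false from rfl, show (("camel" == "title"):Bool) = false from rfl, if_true, Bool.false_eq_true, if_false]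
    rw [wordsA_eq_flat]
    rw [enumGT_zero PySem.Chars.lower pvCap, enumApp_zero 0 2]
    generalize (pvChunks text.toList []).flatMap (pvCamelOf (PySem.Str.upper text == text)) = W
    cases W <;> simp [pvApply_zero, pvApply_two]
  · -- constant
    simp only [recase, recase_alt]
    rw [show pvTable.lookup "constant" = some (['_'], 1, 1) from rfl]
    simp only [show (("constant" == "camel"):Bool) = false from rfl, beq_self_eq_true, show (("constant" == "sentence"):Bool) = false from rfl, show (("constant" == "snake"):Bool) = false from rfl, show (("constant" == "dot"):Bool) = false from rfl, show (("constant" == "kebab"):Bool) = false from rfl, show (("constant" == "path"):Bool) = false from rfl, show (("constant" == "pascal"):Bool) = false from rfl, show (("constant" == "header"):Bool) = false from rfl, show (("constant" == "title"):Bool) = false from rfl, if_true, Bool.false_eq_true, if_false]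
    rw [wordsA_eq_flat]
    simp only [ite_self]
    rw [enum_map_snd (pvApply 1), pvApply_one]
  · -- sentence
    have h := hsent rfl
    simp only [recase, recase_alt]
    rw [show pvTable.lookup "sentence" = some ([' '], 2, 0) from rfl]
    simp only [show (("sentence" == "camel"):Bool) = false from rfl, show (("sentence" == "constant"):Bool) = false from rfl, beq_self_eq_true, show (("sentence" == "snake"):Bool) = false from rfl, show (("sentence" == "dot"):Bool) = false from rfl, show (("sentence" == "kebab"):Bool) = false from rfl, show (("sentence" == "path"):Bool) = false from rfl, show (("sentence" == "pascal"):Bool) = false from rfl, show (("sentence" == "header"):Bool) = false from rfl, show (("sentence" == "title"):Bool) = false from rfl, if_true, Bool.false_eq_true, if_false]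
    rw [wordsA_eq_flat]
    rw [enumApp_zero 2 0]
    have hne : (pvChunks text.toList []).flatMap (pvCamelOf (PySem.Str.upper text == text)) ≠ [] := by
      apply wordsB_ne
      right
      simpa using h
    obtain ⟨w0, wt, hW⟩ := List.exists_cons_of_ne_nil hne
    rw [hW]
    simp [pvApply_zero, pvApply_two, cap_lower]
  · -- snake
    simp only [recase, recase_alt]
    rw [show pvTable.lookup "snake" = some (['_'], 0, 0) from rfl]
    simp only [show (("snake" == "camel"):Bool) = false from rfl, show (("snake" == "constant"):Bool) = false from rfl, show (("snake" == "sentence"):Bool) = false from rfl, beq_self_eq_true, show (("snake" == "dot"):Bool) = false from rfl, show (("snake" == "kebab"):Bool) = false from rfl, show (("snake" == "path"):Bool) = false from rfl, show (("snake" == "pascal"):Bool) = false from rfl, show (("snake" == "header"):Bool) = false from rfl, show (("snake" == "title"):Bool) = false from rfl, if_true, Bool.false_eq_true, if_false]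
    rw [wordsA_eq_flat]
    simp only [ite_self]
    rw [enum_map_snd (pvApply 0), pvApply_zero]
  · -- dot
    simp only [recase, recase_alt]
    rw [show pvTable.lookup "dot" = some (['.'], 0, 0) from rfl]
    simp only [show (("dot" == "camel"):Bool) = false from rfl, show (("dot" == "constant"):Bool) = false from rfl, show (("dot" == "sentence"):Bool) = false from rfl, show (("dot" == "snake"):Bool) = false from rfl, beq_self_eq_true, show (("dot" == "kebab"):Bool) = false from rfl, show (("dot" == "path"):Bool) = false from rfl, show (("dot" == "pascal"):Bool) = false from rfl, show (("dot" == "header"):Bool) = false from rfl, show (("dot" == "title"):Bool) = false from rfl, if_true, Bool.false_eq_true, if_false]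
    rw [wordsA_eq_flat]
    simp only [ite_self]
    rw [enum_map_snd (pvApply 0), pvApply_zero]
  · -- kebab
    simp only [recase, recase_alt]
    rw [show pvTable.lookup "kebab" = some (['-'], 0, 0) from rfl]
    simp only [show (("kebab" == "camel"):Bool) = false from rfl, show (("kebab" == "constant"):Bool) = false from rfl, show (("kebab" == "sentence"):Bool) = false from rfl, show (("kebab" == "snake"):Bool) = false from rfl, show (("kebab" == "dot"):Bool) = false from rfl, beq_self_eq_true, show (("kebab" == "path"):Bool) = false from rfl, show (("kebab" == "pascal"):Bool) = false from rfl, show (("kebab" == "header"):Bool) = false from rfl, show (("kebab" == "title"):Bool) = false from rfl, if_true, Bool.false_eq_true, if_false]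
    rw [wordsA_eq_flat]
    simp only [ite_self]
    rw [enum_map_snd (pvApply 0), pvApply_zero]
  · -- path
    simp only [recase, recase_alt]
    rw [show pvTable.lookup "path" = some (['/'], 0, 0) from rfl]
    simp only [show (("path" == "camel"):Bool) = false from rfl, show (("path" == "constant"):Bool) = false from rfl, show (("path" == "sentence"):Bool) = false from rfl, show (("path" == "snake"):Bool) = false from rfl, show (("path" == "dot"):Bool) = false from rfl, show (("path" == "kebab"):Bool) = false from rfl, beq_self_eq_true, show (("path" == "pascal"):Bool) = false from rfl, show (("path" == "header"):Bool) = false from rfl, show (("path" == "title"):Bool) = false from rfl, if_true, Bool.false_eq_true, if_false]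
    rw [wordsA_eq_flat]
    simp only [ite_self]
    rw [enum_map_snd (pvApply 0), pvApply_zero]
  · -- pascal
    simp only [recase, recase_alt]
    rw [show pvTable.lookup "pascal" = some (([]:List Char), 2, 2) from rfl]
    simp only [show (("pascal" == "camel"):Bool) = false from rfl, show (("pascal" == "constant"):Bool) = false from rfl, show (("pascal" == "sentence"):Bool) = false from rfl, show (("pascal" == "snake"):Bool) = false from rfl, show (("pascal" == "dot"):Bool) = false from rfl, show (("pascal" == "kebab"):Bool) = false from rfl, show (("pascal" == "path"):Bool) = false from rfl, beq_self_eq_true, show (("pascal" == "header"):Bool) = false from rfl, show (("pascal" == "title"):Bool) = false from rfl, if_true, Bool.false_eq_true, if_false]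
    rw [wordsA_eq_flat]
    simp only [ite_self]
    rw [enum_map_snd (pvApply 2), pvApply_two]
  · -- header
    simp only [recase, recase_alt]
    rw [show pvTable.lookup "header" = some (['-'], 2, 2) from rfl]
    simp only [show (("header" == "camel"):Bool) = false from rfl, show (("header" == "constant"):Bool) = false from rfl, show (("header" == "sentence"):Bool) = false from rfl, show (("header" == "snake"):Bool) = false from rfl, show (("header" == "dot"):Bool) = false from rfl, show (("header" == "kebab"):Bool) = false from rfl, show (("header" == "path"):Bool) = false from rfl, show (("header" == "pascal"):Bool) = false from rfl, beq_self_eq_true, show (("header" == "title"):Bool) = false from rfl, if_true, Bool.false_eq_true, if_false]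
    rw [wordsA_eq_flat]
    simp only [ite_self]
    rw [enum_map_snd (pvApply 2), pvApply_two]
  · -- title
    simp only [recase, recase_alt]
    rw [show pvTable.lookup "title" = some (([' ']), 2, 2) from rfl]
    simp only [show (("title" == "camel"):Bool) = false from rfl, show (("title" == "constant"):Bool) = false from rfl, show (("title" == "sentence"):Bool) = false from rfl, show (("title" == "snake"):Bool) = false from rfl, show (("title" == "dot"):Bool) = false from rfl, show (("title" == "kebab"):Bool) = false from rfl, show (("title" == "path"):Bool) = false from rfl, show (("title" == "pascal"):Bool) = false from rfl, show (("title" == "header"):Bool) = false from rfl, beq_self_eq_true, if_true, Bool.false_eq_true, if_false]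
    rw [wordsA_eq_flat]
    simp only [ite_self]
    rw [enum_map_snd (pvApply 2), pvApply_two]
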